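-- pv_equiv track=rewrite | github.com/opencube-horizon/pic-workflow | plot/plot_gantt.py | compute_pool_size
-- ===== SOURCE A (Python) =====
-- from collections import defaultdict
--
-- def compute_pool_size(dates):
--
--     pool_sizes = defaultdict(int)
--     tmp = defaultdict(int)
--
--     for _, ti, event in dates:
--
--         pool, pool_slots = ti['pool'], ti['pool_slots']
--
--         if event == 'start':
--             tmp[pool] += pool_slots
--         else:
--             tmp[pool] -= pool_slots
--
--         # update the pool size
--         pool_sizes[pool] = max(pool_sizes[pool], tmp[pool])
--
--     return pool_sizes
-- ===== SOURCE B (Python) =====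
-- from collections import defaultdict
--
-- def compute_pool_size(dates):
--     # group-by pool first, then a per-pool prefix-sum scan (max seeded at 0)
--     groups = {}
--     for _, ti, event in dates:
--         pool, pool_slots = ti['pool'], ti['pool_slots']
--         groups.setdefault(pool, []).append(pool_slots if event == 'start' else -pool_slots)
--
--     pool_sizes = defaultdict(int)
--     for pool, deltas in groups.items():
--         running = 0
--         best = 0
--         for d in deltas:
--             running += d
--             if running > best:
--                 best = running
--         pool_sizes[pool] = best
--     return pool_sizes
-- ===== Notes on version B (the rewrite author's own statement) =====
-- stated objective: alternative
-- what changed: A's single interleaved scan updating two running dicts is replaced by a group-by pass collecting each pool's ordered signed deltas, followed by an independent prefix-sum/max scan per pool.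
import Mathlib
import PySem

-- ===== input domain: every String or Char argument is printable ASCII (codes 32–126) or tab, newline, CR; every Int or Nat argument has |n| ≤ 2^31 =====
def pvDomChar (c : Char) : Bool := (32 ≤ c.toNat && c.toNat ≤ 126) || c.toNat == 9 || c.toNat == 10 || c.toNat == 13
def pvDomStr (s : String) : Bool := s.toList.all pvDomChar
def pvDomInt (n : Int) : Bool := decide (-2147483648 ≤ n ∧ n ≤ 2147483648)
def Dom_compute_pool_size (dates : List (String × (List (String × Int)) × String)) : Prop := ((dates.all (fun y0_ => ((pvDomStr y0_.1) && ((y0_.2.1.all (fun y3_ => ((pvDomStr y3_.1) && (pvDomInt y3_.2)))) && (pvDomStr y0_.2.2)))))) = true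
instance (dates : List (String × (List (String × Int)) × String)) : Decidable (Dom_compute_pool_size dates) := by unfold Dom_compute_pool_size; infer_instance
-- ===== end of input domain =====

-- B replaces A's single interleaved two-dict scan by a group-by-pool pass followed by an
-- independent prefix-sum/max scan per pool (objective: alternative decomposition, same cost).

-- shared input accessors: ti['pool'] and ti['pool_slots'] (first-match dict lookup;
-- the .getD 0 is only reached outside Pre_, where Python raises KeyError)
def pvPool (y : String × (List (String × Int)) × String) : Int := (y.2.1.lookup "pool").getD 0
def pvSlots (y : String × (List (String × Int)) × String) : Int := (y.2.1.lookup "pool_slots").getD 0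

-- ===== PORT A =====
-- loop body of A: tmp[pool] ± pool_slots, then pool_sizes[pool] = max(pool_sizes[pool], tmp[pool])
def pvStepA (st : PySem.Dict Int Int × PySem.Dict Int Int)
    (y : String × (List (String × Int)) × String) : PySem.Dict Int Int × PySem.Dict Int Int :=
  let pool := pvPool y
  let pool_slots := pvSlots y
  let tmp' := if y.2.2 == "start"
    then st.2.insert pool (st.2.getD pool 0 + pool_slots)
    else st.2.insert pool (st.2.getD pool 0 - pool_slots)
  (st.1.insert pool (max (st.1.getD pool 0) (tmp'.getD pool 0)), tmp')

def compute_pool_size (dates : List (String × (List (String × Int)) × String)) : List (Int × Int) :=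
  (dates.foldl pvStepA (PySem.Dict.empty, PySem.Dict.empty)).1.items

-- ===== PORT B =====
-- the signed delta appended during grouping
def pvDelta (y : String × (List (String × Int)) × String) : Int :=
  if y.2.2 == "start" then pvSlots y else -(pvSlots y)

-- groups.setdefault(pool, []).append(delta)
def pvGroupStep (g : PySem.Dict Int (List Int))
    (y : String × (List (String × Int)) × String) : PySem.Dict Int (List Int) :=
  g.modify (pvPool y) [] (fun ds => ds ++ [pvDelta y])

-- per-pool scan: running sum, maximum seeded at 0
def pvBest (deltas : List Int) : Int :=
  (deltas.foldl (fun (rb : Int × Int) d =>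
      let running := rb.1 + d
      (running, if running > rb.2 then running else rb.2)) (0, 0)).2

def compute_pool_size_alt (dates : List (String × (List (String × Int)) × String)) : List (Int × Int) :=
  let groups := dates.foldl pvGroupStep PySem.Dict.empty
  (groups.items.foldl (fun (sizes : PySem.Dict Int Int) pd => sizes.insert pd.1 (pvBest pd.2))
    PySem.Dict.empty).items

-- ===== PRECONDITION & SPEC =====
-- Pre_ excludes exactly the inputs on which A raises KeyError: some ti lacks 'pool' or 'pool_slots'.
def Pre_compute_pool_size (dates : List (String × (List (String × Int)) × String)) : Prop :=
  (dates.all (fun y => (y.2.1.lookup "pool").isSome && (y.2.1.lookup "pool_slots").isSome)) = true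
instance (dates : List (String × (List (String × Int)) × String)) : Decidable (Pre_compute_pool_size dates) := by unfold Pre_compute_pool_size; infer_instance

def pvWitness_compute_pool_size : (List (String × (List (String × Int)) × String)) :=
  [("t1", [("pool", 1), ("pool_slots", 2)], "start"),
   ("t2", [("pool", 1), ("pool_slots", 2)], "end")]

def Spec_compute_pool_size (dates : List (String × (List (String × Int)) × String)) (out : List (Int × Int)) : Prop := out = compute_pool_size_alt dates
instance (dates : List (String × (List (String × Int)) × String)) (out : List (Int × Int)) : Decidable (Spec_compute_pool_size dates out) := by unfold Spec_compute_pool_size; infer_instance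

-- ===== CLAIM (what is proved, stated in full; the proofs are below) =====
def Claim_equal_compute_pool_size : Prop := ∀ (dates : List (String × (List (String × Int)) × String)), Dom_compute_pool_size dates → Pre_compute_pool_size dates → Spec_compute_pool_size dates (compute_pool_size dates)

-- ===== LEMMAS AND PROOFS =====

-- the running sum tracked by pvBest's fold is the list sum
lemma pvBest_fst (ds : List Int) (s b : Int) :
    (ds.foldl (fun (rb : Int × Int) d =>
      let running := rb.1 + d
      (running, if running > rb.2 then running else rb.2)) (s, b)).1 = s + ds.sum := by
  induction ds generalizing s b with
  | nil => simp
  | cons d t ih => simp [ih]; ring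

-- appending one delta updates the per-pool maximum exactly as A does
lemma pvBest_append (ds : List Int) (d : Int) :
    pvBest (ds ++ [d]) = max (pvBest ds) (ds.sum + d) := by
  unfold pvBest
  rw [List.foldl_append]
  simp only [List.foldl_cons, List.foldl_nil, pvBest_fst]
  rcases lt_trichotomy ((0 : Int) + ds.sum + d)
      ((ds.foldl (fun (rb : Int × Int) d =>
        (rb.1 + d, if rb.1 + d > rb.2 then rb.1 + d else rb.2)) (0, 0)).2) with h | h | h
  all_goals simp [max_def]; omega

-- lookup through a value-mapped items list
lemma get?_map_items {α β : Type} (f : α → β) (L : List (Int × α)) (k : Int) :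
    (PySem.Dict.mk (L.map (fun pd => (pd.1, f pd.2)))).get? k
      = ((PySem.Dict.mk L).get? k).map f := by
  induction L with
  | nil => rfl
  | cons p t ih =>
    simp only [PySem.Dict.get?, List.map_cons, List.find?_cons] at *
    by_cases h : (p.1 == k) = true
    · simp [h]
    · simp [h] at ih ⊢; exact ih

lemma getD_map_items {α β : Type} (f : α → β) (e : PySem.Dict Int α) (d : PySem.Dict Int β)
    (h : d.items = e.items.map (fun pd => (pd.1, f pd.2))) (k : Int) (a : α) :
    d.getD k (f a) = f (e.getD k a) := by
  have : d = PySem.Dict.mk (e.items.map (fun pd => (pd.1, f pd.2))) := by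
    apply PySem.Dict.ext; exact h
  subst this
  simp only [PySem.Dict.getD, get?_map_items]
  cases (PySem.Dict.mk e.items).get? k <;> rfl

lemma contains_map_items {α β : Type} (f : α → β) (e : PySem.Dict Int α) (d : PySem.Dict Int β)
    (h : d.items = e.items.map (fun pd => (pd.1, f pd.2))) (k : Int) :
    d.contains k = e.contains k := by
  simp only [PySem.Dict.contains, h, List.any_map]
  rfl

-- inserting f v in the mapped dict mirrors inserting v in the original
lemma insert_map_items {α β : Type} (f : α → β) (e : PySem.Dict Int α) (d : PySem.Dict Int β)
    (h : d.items = e.items.map (fun pd => (pd.1, f pd.2))) (k : Int) (v : α) :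
    (d.insert k (f v)).items = (e.insert k v).items.map (fun pd => (pd.1, f pd.2)) := by
  simp only [PySem.Dict.insert, contains_map_items f e d h]
  by_cases hc : e.contains k = true
  · simp only [hc, if_pos, h, List.map_map]
    apply List.map_congr_left
    intro p _
    by_cases hp : (p.1 == k) = true <;> simp [hp, Function.comp]
  · simp [hc, h]

-- one loop iteration preserves the simulation between A's two dicts and B's groups
lemma step_sim (y : String × (List (String × Int)) × String)
    (sizes tmp : PySem.Dict Int Int) (g : PySem.Dict Int (List Int))
    (h1 : sizes.items = g.items.map (fun pd => (pd.1, pvBest pd.2)))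
    (h2 : tmp.items = g.items.map (fun pd => (pd.1, pd.2.sum))) :
    (pvStepA (sizes, tmp) y).1.items
        = (pvGroupStep g y).items.map (fun pd => (pd.1, pvBest pd.2))
    ∧ (pvStepA (sizes, tmp) y).2.items
        = (pvGroupStep g y).items.map (fun pd => (pd.1, pd.2.sum)) := by
  have hsum : tmp.getD (pvPool y) 0 = (g.getD (pvPool y) []).sum := by
    have := getD_map_items List.sum g tmp h2 (pvPool y) []
    simpa using this
  have hbest : sizes.getD (pvPool y) 0 = pvBest (g.getD (pvPool y) []) := by
    have := getD_map_items pvBest g sizes h1 (pvPool y) []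
    simpa [pvBest] using this
  have htmp' : (pvStepA (sizes, tmp) y).2
      = tmp.insert (pvPool y) (tmp.getD (pvPool y) 0 + pvDelta y) := by
    simp only [pvStepA, pvDelta]
    by_cases hs : (y.2.2 == "start") = true
    · simp [hs]
    · simp [hs, sub_eq_add_neg]
  have hvsum : tmp.getD (pvPool y) 0 + pvDelta y
      = (g.getD (pvPool y) [] ++ [pvDelta y]).sum := by
    simp [hsum]
  have hG : (pvGroupStep g y)
      = g.insert (pvPool y) (g.getD (pvPool y) [] ++ [pvDelta y]) := rfl
  constructor
  · have hval : max (sizes.getD (pvPool y) 0) ((pvStepA (sizes, tmp) y).2.getD (pvPool y) 0)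
        = pvBest (g.getD (pvPool y) [] ++ [pvDelta y]) := by
      rw [htmp', PySem.Dict.getD_insert]
      simp [hbest, pvBest_append, hsum]
    have : (pvStepA (sizes, tmp) y).1
        = sizes.insert (pvPool y)
            (pvBest (g.getD (pvPool y) [] ++ [pvDelta y])) := by
      simp only [pvStepA]
      rw [← hval]
      rfl
    rw [this, hG]
    exact insert_map_items pvBest g sizes h1 (pvPool y) _
  · rw [htmp', hvsum, hG]
    exact insert_map_items List.sum g tmp h2 (pvPool y) _

-- A's whole loop is simulated by B's grouping loop
lemma fold_sim (l : List (String × (List (String × Int)) × String))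
    (sizes tmp : PySem.Dict Int Int) (g : PySem.Dict Int (List Int))
    (h1 : sizes.items = g.items.map (fun pd => (pd.1, pvBest pd.2)))
    (h2 : tmp.items = g.items.map (fun pd => (pd.1, pd.2.sum))) :
    (l.foldl pvStepA (sizes, tmp)).1.items
      = (l.foldl pvGroupStep g).items.map (fun pd => (pd.1, pvBest pd.2)) := by
  induction l generalizing sizes tmp g with
  | nil => simpa using h1
  | cons y t ih =>
    obtain ⟨s1, s2⟩ := step_sim y sizes tmp g h1 h2
    simpa using ih (pvStepA (sizes, tmp) y).1 (pvStepA (sizes, tmp) y).2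
      (pvGroupStep g y) s1 s2

-- B's second phase writes each pool once, so it is the value map over the groups
lemma phase2 (dates : List (String × (List (String × Int)) × String)) :
    compute_pool_size_alt dates
      = (dates.foldl pvGroupStep PySem.Dict.empty).items.map
          (fun pd => (pd.1, pvBest pd.2)) := by
  unfold compute_pool_size_alt
  have hnd : (dates.foldl pvGroupStep PySem.Dict.empty).keys.Nodup := by
    have := PySem.Dict.nodup_keys_foldl_modify_key dates pvPool []
      (fun _ y => (fun ds => ds ++ [pvDelta y])) PySem.Dict.empty (by simp [PySem.Dict.empty])
    exact this
  have := PySem.Dict.items_foldl_insert_fresh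
    (dates.foldl pvGroupStep PySem.Dict.empty).items
    (fun pd => pd.1) (fun pd => pvBest pd.2) PySem.Dict.empty
    (by intro a _; simp [PySem.Dict.contains, PySem.Dict.empty])
    (by simpa [PySem.Dict.keys] using hnd)
  simpa [PySem.Dict.empty] using this

-- ===== VERDICT (by name: the statement is the Claim_ definition above) =====
theorem compute_pool_size_spec : Claim_equal_compute_pool_size := by
  intro dates _ _
  unfold Spec_compute_pool_size compute_pool_size
  rw [phase2]
  exact fold_sim dates PySem.Dict.empty PySem.Dict.empty PySem.Dict.empty rfl rfl
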